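-- pv_equiv track=rewrite | github.com/omriporat/adaptive_learning | code/scripts/resfile_permutations.py | calculate_permutations
-- ===== SOURCE A (Python) =====
-- def calculate_permutations(mutations_dict, min_mutations, max_mutations):
--     total_permutations = 0
--     possible_mut_nums = list(mutations_dict.values())
--     possible_mut_nums = [m - 1 for m in possible_mut_nums]  # Subtract 1 to exclude the native residue
--
--     n = len(possible_mut_nums)
--     # dp[k] will store the number of ways to have exactly k mutations
--     dp = [0] * (n + 1)
--     dp[0] = 1  # Base case: 1 way to have 0 mutations (native)
--
--     for m_i in possible_mut_nums:
--         # We iterate backwards to avoid using the same position's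
--         # mutation multiple times in the same step
--         for k in range(n, -1, -1):
--             # The new ways to get k mutations is:
--             # (Ways to have k mutations already) + (Ways to have k-1 mutations * available mutants at this site)
--             if k > 0:
--                 dp[k] = dp[k] + (dp[k-1] * m_i)
--             else:
--                 # dp[0] remains 1 (the native sequence)
--                 pass
--
--     # Sum the permutations within the specified range
--     total_permutations = sum(dp[min_mutations : max_mutations + 1])
--     return total_permutations, dp
-- ===== SOURCE B (Python) =====
-- def _polymul(a, b):
--     la, lb = len(a), len(b)
--     return [
--         sum(a[i] * b[k - i] for i in range(max(0, k - lb + 1), min(k + 1, la)))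
--         for k in range(la + lb - 1)
--     ]
--
--
-- def _prod_tree(ms):
--     # product of the linear polynomials (1 + m*x) for m in ms, as a coefficient list
--     if len(ms) == 0:
--         return [1]
--     if len(ms) == 1:
--         return [1, ms[0]]
--     h = len(ms) // 2
--     return _polymul(_prod_tree(ms[:h]), _prod_tree(ms[h:]))
--
--
-- def calculate_permutations(mutations_dict, min_mutations, max_mutations):
--     ms = [m - 1 for m in mutations_dict.values()]
--     dp = _prod_tree(ms)
--     total_permutations = sum(dp[min_mutations : max_mutations + 1])
--     return total_permutations, dp
-- ===== Notes on version B (the rewrite author's own statement) =====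
-- stated objective: alternative
-- what changed: A's in-place backward DP sweep over a fixed (n+1)-slot array is replaced by a divide-and-conquer product tree that multiplies the linear polynomials (1 + m*x) by schoolbook convolution; the dp list is the coefficient list of that product. Not faster in practice: A's updates multiply a big coefficient by a small factor, while the tree's top merges multiply big coefficients together.
import Mathlib
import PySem

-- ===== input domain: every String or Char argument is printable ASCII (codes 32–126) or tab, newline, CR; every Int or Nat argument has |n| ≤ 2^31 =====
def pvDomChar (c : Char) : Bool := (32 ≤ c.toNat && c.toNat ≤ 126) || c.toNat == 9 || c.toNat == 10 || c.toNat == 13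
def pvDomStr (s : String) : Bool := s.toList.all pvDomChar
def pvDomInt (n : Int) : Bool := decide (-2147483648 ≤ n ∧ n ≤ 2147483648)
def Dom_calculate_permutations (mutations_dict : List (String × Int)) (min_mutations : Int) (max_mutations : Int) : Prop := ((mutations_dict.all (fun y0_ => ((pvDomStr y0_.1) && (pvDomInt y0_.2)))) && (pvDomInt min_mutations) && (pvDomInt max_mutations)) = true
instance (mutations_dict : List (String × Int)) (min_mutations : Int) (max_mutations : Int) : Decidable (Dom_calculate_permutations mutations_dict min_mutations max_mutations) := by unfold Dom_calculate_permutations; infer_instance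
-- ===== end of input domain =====

-- B replaces A's in-place backward DP sweep by a divide-and-conquer product of the linear
-- polynomials (1 + m·x) (objective: alternative algorithm).

-- ===== PORT A =====
-- body of the inner 'for k in range(n, -1, -1)' loop; k ∈ [0..n] and dp.length = n+1 throughout,
-- so direct indexing with .toNat is exact here (the indexing branch has k > 0)
def pvStepA (m_i : Int) (dp : List Int) (k : Int) : List Int :=
  if k > 0 then dp.set k.toNat (dp.getD k.toNat 0 + dp.getD (k - 1).toNat 0 * m_i) else dp

def calculate_permutations (mutations_dict : List (String × Int)) (min_mutations : Int) (max_mutations : Int) : Int × List Int :=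
  let possible_mut_nums := (PySem.Dict.ofList mutations_dict).values
  let possible_mut_nums := possible_mut_nums.map (fun m => m - 1)
  let n := possible_mut_nums.length
  let dp := (List.replicate (n + 1) (0 : Int)).set 0 1
  let dp := possible_mut_nums.foldl
    (fun dp m_i => (PySem.List.pyRange (n : Int) (-1) (-1)).foldl (pvStepA m_i) dp) dp
  ((PySem.List.slice dp (some min_mutations) (some (max_mutations + 1))).sum, dp)

-- ===== PORT B =====
-- schoolbook convolution: [sum(a[i]*b[k-i] for i in range(max(0,k-lb+1), min(k+1,la))) for k in range(la+lb-1)]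
-- Nat subtraction clamps at 0, so 'k + 1 - b.length' is Python's max(0, k - lb + 1); both indices
-- are in range over that interval, so getD indexing is exact
def pvPolyMul (a b : List Int) : List Int :=
  (List.range (a.length + b.length - 1)).map (fun k =>
    ((List.range' (k + 1 - b.length) (min (k + 1) a.length - (k + 1 - b.length))).map
      (fun i => a.getD i 0 * b.getD (k - i) 0)).sum)

-- product tree over the linear factors (1 + m·x)
def pvProdTree (ms : List Int) : List Int :=
  if _h0 : ms.length = 0 then [1]
  else if _h1 : ms.length = 1 then [1, ms.headI]
  else
    pvPolyMul (pvProdTree (ms.take (ms.length / 2))) (pvProdTree (ms.drop (ms.length / 2)))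
termination_by ms.length
decreasing_by
  · simp only [List.length_take]; omega
  · simp only [List.length_drop]; omega

def calculate_permutations_alt (mutations_dict : List (String × Int)) (min_mutations : Int) (max_mutations : Int) : Int × List Int :=
  let ms := ((PySem.Dict.ofList mutations_dict).values).map (fun m => m - 1)
  let dp := pvProdTree ms
  ((PySem.List.slice dp (some min_mutations) (some (max_mutations + 1))).sum, dp)

-- ===== PRECONDITION & SPEC =====
def Spec_calculate_permutations (mutations_dict : List (String × Int)) (min_mutations : Int) (max_mutations : Int) (out : Int × List Int) : Prop := out = calculate_permutations_alt mutations_dict min_mutations max_mutations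
instance (mutations_dict : List (String × Int)) (min_mutations : Int) (max_mutations : Int) (out : Int × List Int) : Decidable (Spec_calculate_permutations mutations_dict min_mutations max_mutations out) := by unfold Spec_calculate_permutations; infer_instance

-- ===== CLAIM (what is proved, stated in full; the proofs are below) =====
def Claim_equal_calculate_permutations : Prop := ∀ (mutations_dict : List (String × Int)) (min_mutations : Int) (max_mutations : Int), Dom_calculate_permutations mutations_dict min_mutations max_mutations → Spec_calculate_permutations mutations_dict min_mutations max_mutations (calculate_permutations mutations_dict min_mutations max_mutations)

-- ===== LEMMAS AND PROOFS =====

-- the polynomial a coefficient list denotes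
noncomputable def pvToPoly (l : List Int) : Polynomial ℤ :=
  ∑ i ∈ Finset.range l.length, Polynomial.C (l.getD i 0) * Polynomial.X ^ i

-- the linear factor 1 + m·x
noncomputable def pvLin (m : Int) : Polynomial ℤ := Polynomial.C m * Polynomial.X + 1

lemma pvToPoly_coeff (l : List Int) (k : ℕ) : (pvToPoly l).coeff k = l.getD k 0 := by
  unfold pvToPoly
  rw [Polynomial.finset_sum_coeff]
  simp only [Polynomial.coeff_C_mul, Polynomial.coeff_X_pow, mul_ite, mul_one, mul_zero]
  rw [Finset.sum_ite_eq]
  split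
  · rfl
  · rename_i h
    rw [List.getD_eq_default]
    simp only [Finset.mem_range, not_lt] at h
    exact h

lemma pvLength_polyMul (a b : List Int) : (pvPolyMul a b).length = a.length + b.length - 1 := by
  simp [pvPolyMul]

lemma pvSumRange' (lo cnt : ℕ) (f : ℕ → ℤ) :
    ((List.range' lo cnt).map f).sum = ∑ i ∈ Finset.Ico lo (lo + cnt), f i := by
  induction cnt generalizing lo with
  | zero => simp
  | succ c ih =>
    rw [List.range'_succ, List.map_cons, List.sum_cons, ih (lo + 1),
      show lo + (c + 1) = (lo + 1) + c from by omega,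
      Finset.sum_eq_sum_Ico_succ_bot (by omega : lo < lo + 1 + c) f]

lemma pvToPoly_polyMul (a b : List Int) (ha : a ≠ []) (hb : b ≠ []) :
    pvToPoly (pvPolyMul a b) = pvToPoly a * pvToPoly b := by
  have hla : 1 ≤ a.length := List.length_pos_iff.mpr ha
  have hlb : 1 ≤ b.length := List.length_pos_iff.mpr hb
  ext k
  rw [pvToPoly_coeff, Polynomial.coeff_mul]
  rw [Finset.Nat.sum_antidiagonal_eq_sum_range_succ_mk]
  simp only [pvToPoly_coeff]
  by_cases hk : k < a.length + b.length - 1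
  · rw [show (pvPolyMul a b).getD k 0
        = ((List.range' (k + 1 - b.length) (min (k + 1) a.length - (k + 1 - b.length))).map
            (fun i => a.getD i 0 * b.getD (k - i) 0)).sum from
        PySem.List.getD_map_range _ _ _ _ (by simpa [pvPolyMul] using hk)]
    rw [pvSumRange']
    rw [show (k + 1 - b.length) + (min (k + 1) a.length - (k + 1 - b.length))
        = min (k + 1) a.length from by omega]
    apply Finset.sum_subset
    · intro i hi
      simp only [Finset.mem_Ico] at hi
      simp only [Finset.mem_range]
      omega
    · intro i hi hni
      simp only [Finset.mem_range] at hi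
      simp only [Finset.mem_Ico, not_and_or, not_le, not_lt] at hni
      rcases hni with h | h
      · rw [List.getD_eq_default b _ (by omega)]; ring
      · rw [List.getD_eq_default a _ (by omega)]; ring
  · rw [List.getD_eq_default _ _ (by simp [pvPolyMul]; omega)]
    symm
    apply Finset.sum_eq_zero
    intro i hi
    simp only [Finset.mem_range] at hi
    by_cases hia : i < a.length
    · rw [List.getD_eq_default b _ (by omega)]
      ring
    · rw [List.getD_eq_default a _ (by omega)]
      ring

lemma pvProdTree_spec (ms : List Int) :
    (pvProdTree ms).length = ms.length + 1 ∧
    pvToPoly (pvProdTree ms) = ((ms.map pvLin).prod) := by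
  induction ms using pvProdTree.induct with
  | case1 ms h0 =>
    rw [pvProdTree, dif_pos h0]
    obtain rfl : ms = [] := List.length_eq_zero_iff.mp h0
    refine ⟨rfl, ?_⟩
    simp [pvToPoly]
  | case2 ms h0 h1 =>
    rw [pvProdTree, dif_neg h0, dif_pos h1]
    obtain ⟨m, rfl⟩ := List.length_eq_one_iff.mp h1
    refine ⟨rfl, ?_⟩
    simp [pvToPoly, Finset.sum_range_succ, pvLin]
    ring
  | case3 ms h0 h1 ih1 ih2 =>
    rw [pvProdTree, dif_neg h0, dif_neg h1]
    obtain ⟨hl1, hp1⟩ := ih1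
    obtain ⟨hl2, hp2⟩ := ih2
    have hlt : (ms.take (ms.length / 2)).length = ms.length / 2 := by
      simp [List.length_take]; omega
    have hld : (ms.drop (ms.length / 2)).length = ms.length - ms.length / 2 := by
      simp [List.length_drop]
    constructor
    · rw [pvLength_polyMul, hl1, hl2, hlt, hld]; omega
    · rw [pvToPoly_polyMul _ _ (by intro h; rw [h] at hl1; simp at hl1)
        (by intro h; rw [h] at hl2; simp at hl2), hp1, hp2,
        ← List.prod_append, ← List.map_append, List.take_append_drop]

lemma pvGetD_set_ne (l : List Int) (k i : ℕ) (v : Int) (hne : i ≠ k) :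
    (l.set k v).getD i 0 = l.getD i 0 := by
  simp [List.getD_eq_getElem?_getD, List.getElem?_set_ne hne.symm]

lemma pvGetD_set_self (l : List Int) (k : ℕ) (v : Int) (h : k < l.length) :
    (l.set k v).getD k 0 = v := by
  simp [List.getD_eq_getElem?_getD, h]

lemma pvMapGetD (l : List Int) : (List.range l.length).map (fun i => l.getD i 0) = l := by
  apply List.ext_getElem
  · simp
  · intro i h1 h2
    simp [List.getElem?_eq_getElem h2]

lemma pvInnerLoop (m : Int) (dp : List Int) (j : ℕ) (hj : j < dp.length) :
    (PySem.List.pyRange (j : Int) (-1) (-1)).foldl (pvStepA m) dp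
      = (List.range dp.length).map (fun i =>
          if 1 ≤ i ∧ i ≤ j then dp.getD i 0 + dp.getD (i - 1) 0 * m else dp.getD i 0) := by
  induction j generalizing dp with
  | zero =>
    rw [PySem.List.pyRange_neg_one_cons (by norm_num), PySem.List.pyRange_neg_one_eq_nil (by norm_num)]
    simp only [List.foldl_cons, List.foldl_nil]
    rw [show pvStepA m dp ((0:ℕ):Int) = dp from by simp [pvStepA]]
    conv_lhs => rw [← pvMapGetD dp]
    apply List.map_congr_left
    intro i _
    have : ¬ (1 ≤ i ∧ i ≤ 0) := by omega
    rw [if_neg this]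
  | succ j ih =>
    have hcast : ((j + 1 : ℕ) : Int) = (j : Int) + 1 := by push_cast; ring
    rw [hcast, PySem.List.pyRange_neg_one_cons (by omega), List.foldl_cons]
    have hstep : pvStepA m dp ((j : Int) + 1)
        = dp.set (j + 1) (dp.getD (j + 1) 0 + dp.getD j 0 * m) := by
      rw [pvStepA, if_pos (by omega : ((j : Int) + 1) > 0)]
      have h1 : ((j : Int) + 1).toNat = j + 1 := by omega
      have h2 : ((j : Int) + 1 - 1).toNat = j := by omega
      rw [h1, h2]
    rw [hstep]
    set v := dp.getD (j + 1) 0 + dp.getD j 0 * m with hv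
    set dp' := dp.set (j + 1) v with hdp'
    have hlen : dp'.length = dp.length := by simp [hdp']
    rw [show (j:Int) + 1 - 1 = (j:Int) from by ring]
    rw [ih dp' (by omega)]
    rw [hlen]
    apply List.map_congr_left
    intro i hi
    simp only [List.mem_range] at hi
    by_cases hij : i ≤ j
    · have h1 : dp'.getD i 0 = dp.getD i 0 := pvGetD_set_ne _ _ _ _ (by omega)
      have h2 : dp'.getD (i - 1) 0 = dp.getD (i - 1) 0 := pvGetD_set_ne _ _ _ _ (by omega)
      rw [h1, h2]
      by_cases h1i : 1 ≤ i
      · rw [if_pos ⟨h1i, hij⟩, if_pos ⟨h1i, by omega⟩]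
      · rw [if_neg (by omega), if_neg (by omega)]
    · by_cases hie : i = j + 1
      · subst hie
        rw [if_neg (by omega), if_pos ⟨by omega, le_refl _⟩]
        rw [hdp', pvGetD_set_self _ _ _ (by omega), hv]
        norm_num
      · rw [if_neg (by omega), if_neg (by omega)]
        exact pvGetD_set_ne _ _ _ _ (by omega)

lemma pvCoeff_mul_lin (Q : Polynomial ℤ) (m : Int) (i : ℕ) :
    (Q * pvLin m).coeff i = if 1 ≤ i then Q.coeff i + Q.coeff (i - 1) * m else Q.coeff i := by
  have h : Q * pvLin m = Polynomial.C m * (Q * Polynomial.X) + Q := by rw [pvLin]; ring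
  rw [h]
  cases i with
  | zero =>
    simp
  | succ k =>
    simp only [Polynomial.coeff_add, Polynomial.coeff_C_mul, Polynomial.coeff_mul_X,
      if_pos (by omega : 1 ≤ k + 1), Nat.add_sub_cancel]
    ring

lemma pvOuterLoop (n : ℕ) (ms : List Int) (Q : Polynomial ℤ) :
    ms.foldl (fun dp m_i => (PySem.List.pyRange (n : Int) (-1) (-1)).foldl (pvStepA m_i) dp)
      ((List.range (n + 1)).map (fun i => Q.coeff i))
    = (List.range (n + 1)).map (fun i => (Q * (ms.map pvLin).prod).coeff i) := by
  induction ms generalizing Q with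
  | nil => simp
  | cons m rest ih =>
    rw [List.foldl_cons]
    have hlen : ((List.range (n + 1)).map (fun i => Q.coeff i)).length = n + 1 := by simp
    rw [pvInnerLoop m _ n (by omega)]
    have hmid : (List.range (((List.range (n + 1)).map (fun i => Q.coeff i)).length)).map
          (fun i => if 1 ≤ i ∧ i ≤ n
            then ((List.range (n + 1)).map (fun i => Q.coeff i)).getD i 0
                  + ((List.range (n + 1)).map (fun i => Q.coeff i)).getD (i - 1) 0 * m
            else ((List.range (n + 1)).map (fun i => Q.coeff i)).getD i 0)
        = (List.range (n + 1)).map (fun i => (Q * pvLin m).coeff i) := by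
      rw [hlen]
      apply List.map_congr_left
      intro i hi
      simp only [List.mem_range] at hi
      rw [pvCoeff_mul_lin]
      have g1 : ((List.range (n + 1)).map (fun i => Q.coeff i)).getD i 0 = Q.coeff i :=
        PySem.List.getD_map_range _ _ _ _ hi
      by_cases h1i : 1 ≤ i
      · have g2 : ((List.range (n + 1)).map (fun i => Q.coeff i)).getD (i - 1) 0 = Q.coeff (i - 1) :=
          PySem.List.getD_map_range _ _ _ _ (by omega)
        rw [if_pos ⟨h1i, by omega⟩, if_pos h1i, g1, g2]
      · rw [if_neg (by omega), if_neg h1i, g1]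
    rw [hmid, ih (Q * pvLin m), List.map_cons, List.prod_cons, mul_assoc]

lemma pvInit (n : ℕ) :
    (List.replicate (n + 1) (0 : Int)).set 0 1
      = (List.range (n + 1)).map (fun i => (1 : Polynomial ℤ).coeff i) := by
  apply List.ext_getElem
  · simp
  · intro i h1 h2
    simp only [List.length_set, List.length_replicate] at h1
    rw [List.getElem_set, List.getElem_map, List.getElem_range, List.getElem_replicate,
      Polynomial.coeff_one]
    by_cases h0 : i = 0
    · simp [h0]
    · simp [h0, Ne.symm h0]

lemma pvProdTree_eq_map (ms : List Int) :
    pvProdTree ms = (List.range (ms.length + 1)).map (fun i => ((ms.map pvLin).prod).coeff i) := by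
  obtain ⟨hl, hp⟩ := pvProdTree_spec ms
  apply List.ext_getElem
  · simp [hl]
  · intro i h1 h2
    rw [List.getElem_map, List.getElem_range, ← hp, pvToPoly_coeff,
      List.getD_eq_getElem _ _ (by omega)]

lemma pvDpEq (ms : List Int) :
    ms.foldl (fun dp m_i => (PySem.List.pyRange (ms.length : Int) (-1) (-1)).foldl (pvStepA m_i) dp)
      ((List.replicate (ms.length + 1) (0 : Int)).set 0 1)
    = pvProdTree ms := by
  rw [pvInit, pvOuterLoop, pvProdTree_eq_map, one_mul]

-- ===== VERDICT (by name: the statement is the Claim_ definition above) =====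
theorem calculate_permutations_spec : Claim_equal_calculate_permutations := by
  intro mutations_dict min_mutations max_mutations _hdom
  unfold Spec_calculate_permutations calculate_permutations calculate_permutations_alt
  dsimp only
  rw [pvDpEq]
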